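-- pv_equiv track=rewrite | github.com/raeez/chiral-bar-cobar | compute/lib/genus1_pbw_sl2.py | _decode_tensor_index
-- ===== SOURCE A (Python) =====
-- DIM_SL2 = 3  # basis: e=0, h=1, f=2
--
-- def _decode_tensor_index(index: int, power: int) -> list[int]:
--     """Decode base-dim(g) index into tensor-factor indices."""
--     d = DIM_SL2
--     if power < 1:
--         raise ValueError("power must be >= 1")
--     digits = [0] * power
--     value = index
--     for pos in range(power - 1, -1, -1):
--         digits[pos] = value % d
--         value //= d
--     return digits
-- ===== SOURCE B (Python) =====
-- DIM_SL2 = 3  # basis: e=0, h=1, f=2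
--
-- def _decode_tensor_index(index: int, power: int) -> list[int]:
--     """Decode base-dim(g) index into tensor-factor indices."""
--     if power < 1:
--         raise ValueError("power must be >= 1")
--
--     def go(value: int, p: int) -> list[int]:
--         if p == 1:
--             return [value % DIM_SL2]
--         half = p // 2
--         hi, lo = divmod(value, DIM_SL2 ** half)
--         return go(hi, p - half) + go(lo, half)
--
--     return go(index, power)
-- ===== Notes on version B (the rewrite author's own statement) =====
-- stated objective: alternative
-- what changed: B decodes by divide and conquer: one divmod by 3**(p//2) splits the problem into the high and low digit halves recursively, instead of A's descending loop threading a running quotient through a mutated digits array.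
import Mathlib
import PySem

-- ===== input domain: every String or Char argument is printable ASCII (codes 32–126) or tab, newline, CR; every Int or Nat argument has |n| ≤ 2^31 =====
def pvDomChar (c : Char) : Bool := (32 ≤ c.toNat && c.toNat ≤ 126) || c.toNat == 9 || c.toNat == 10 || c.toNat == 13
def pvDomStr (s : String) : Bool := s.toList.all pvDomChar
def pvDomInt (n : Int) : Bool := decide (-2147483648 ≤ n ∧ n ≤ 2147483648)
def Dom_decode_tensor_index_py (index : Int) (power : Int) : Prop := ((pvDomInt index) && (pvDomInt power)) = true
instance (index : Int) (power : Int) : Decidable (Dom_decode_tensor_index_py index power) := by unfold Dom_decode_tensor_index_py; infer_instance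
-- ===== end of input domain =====

-- B decodes by divide and conquer: one divmod by 3^(p/2) splits the digit list into
-- high and low halves, recursively; A threads a running quotient through a mutated
-- digits array (objective: alternative; no speed claim).

-- ===== PORT A =====
-- A's descending loop fills digits[pos] for pos = power-1 … 0 from a running
-- quotient `value`; prepending to the already-filled suffix `acc` is exactly
-- that assignment at the descending index.
def decodeLoopA : Nat → Int → List Int → List Int
  | 0, _, acc => acc
  | n + 1, value, acc => decodeLoopA n (Int.fdiv value 3) (Int.fmod value 3 :: acc)

def decode_tensor_index_py (index : Int) (power : Int) : List Int :=
  if power < 1 then []   -- Python raises ValueError here; excluded by Pre_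
  else decodeLoopA power.toNat index []

-- ===== PORT B =====
-- B's helper `go`: split the p digits as the (p - p/2) high digits of the floor
-- quotient by 3^(p/2) and the p/2 low digits of the floor remainder (Python divmod).
def decodeDC (v : Int) (p : Nat) : List Int :=
  if p = 1 then [Int.fmod v 3]
  else if p ≤ 1 then []   -- p = 0: unreachable, `go` is only called with p ≥ 1
  else
    decodeDC (Int.fdiv v (3 ^ (p / 2))) (p - p / 2) ++
      decodeDC (Int.fmod v (3 ^ (p / 2))) (p / 2)
termination_by p
decreasing_by all_goals omega

def decode_tensor_index_py_alt (index : Int) (power : Int) : List Int :=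
  if power < 1 then []   -- Python raises ValueError here; excluded by Pre_
  else decodeDC index power.toNat

-- ===== PRECONDITION & SPEC =====
-- Pre_ excludes exactly power < 1, where the Python A raises ValueError.
def Pre_decode_tensor_index_py (_index : Int) (power : Int) : Prop := 1 ≤ power
instance (index : Int) (power : Int) : Decidable (Pre_decode_tensor_index_py index power) := by
  unfold Pre_decode_tensor_index_py; infer_instance

def pvWitness_decode_tensor_index_py : Int × Int := (5, 2)

def Spec_decode_tensor_index_py (index : Int) (power : Int) (out : List Int) : Prop :=
  out = decode_tensor_index_py_alt index power
instance (index : Int) (power : Int) (out : List Int) : Decidable (Spec_decode_tensor_index_py index power out) := by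
  unfold Spec_decode_tensor_index_py; infer_instance

-- ===== CLAIM (what is proved, stated in full; the proofs are below) =====
def Claim_equal_decode_tensor_index_py : Prop :=
  ∀ (index : Int) (power : Int), Dom_decode_tensor_index_py index power →
    Pre_decode_tensor_index_py index power →
    Spec_decode_tensor_index_py index power (decode_tensor_index_py index power)

-- ===== LEMMAS AND PROOFS =====

-- Two successive floor-divisions by positive divisors collapse to one.
theorem fdiv_fdiv_pos (a : Int) (b c : Int) (hb : 0 < b) (hc : 0 < c) :
    Int.fdiv (Int.fdiv a b) c = Int.fdiv a (b * c) := by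
  rw [Int.fdiv_eq_ediv_of_nonneg _ hb.le, Int.fdiv_eq_ediv_of_nonneg _ hc.le,
      Int.fdiv_eq_ediv_of_nonneg _ (by positivity)]
  exact Int.ediv_ediv_of_nonneg hb.le

-- The running-quotient loop computes, at position pos, the digit obtained by one
-- floor-division of the initial value by 3^(n-1-pos).
theorem decodeLoopA_eq (n : Nat) (v : Int) (acc : List Int) :
    decodeLoopA n v acc =
      (List.range n).map (fun pos => Int.fmod (Int.fdiv v (3 ^ (n - 1 - pos))) 3) ++ acc := by
  induction n generalizing v acc with
  | zero => simp [decodeLoopA]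
  | succ n ih =>
    rw [decodeLoopA, ih, List.range_succ, List.map_append]
    simp only [List.map_cons, List.map_nil, List.append_assoc, List.cons_append,
      List.nil_append]
    congr 1
    · apply List.map_congr_left
      intro pos hpos
      have hlt : pos < n := List.mem_range.mp hpos
      have : n + 1 - 1 - pos = (n - 1 - pos) + 1 := by omega
      rw [this, fdiv_fdiv_pos v 3 (3 ^ (n - 1 - pos)) (by norm_num) (by positivity),
        pow_succ']
    · have h0 : n + 1 - 1 - n = 0 := by omega
      simp

-- Low digits of a floor remainder are low digits of the original value.
theorem fmod_fdiv_fmod (v : Int) (half j : Nat) (hj : j < half) :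
    Int.fmod (Int.fdiv (Int.fmod v (3 ^ half)) (3 ^ j)) 3 =
      Int.fmod (Int.fdiv v (3 ^ j)) 3 := by
  have hm : (0:Int) < 3 ^ half := by positivity
  have hjpos : (0:Int) < 3 ^ j := by positivity
  rw [Int.fmod_eq_emod_of_nonneg _ hm.le, Int.fdiv_eq_ediv_of_nonneg _ hjpos.le,
      Int.fdiv_eq_ediv_of_nonneg _ hjpos.le, Int.fmod_eq_emod_of_nonneg _ (by norm_num),
      Int.fmod_eq_emod_of_nonneg _ (by norm_num)]
  set q : Int := v / 3 ^ half with hq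
  have hsplit : v % 3 ^ half = v + (-q) * 3 ^ half := by
    have := Int.ediv_add_emod v (3 ^ half)
    rw [← hq] at this; linarith
  have hfac : (3:Int) ^ half = (3 ^ (half - j - 1) * 3) * 3 ^ j := by
    rw [← pow_succ, ← pow_add]; congr 1; omega
  rw [hsplit, hfac, show (-q) * ((3:Int) ^ (half - j - 1) * 3 * 3 ^ j) =
        ((-q) * (3 ^ (half - j - 1) * 3)) * 3 ^ j from by ring,
      Int.add_mul_ediv_right _ _ (ne_of_gt hjpos),
      show v / (3:Int) ^ j + (-q) * (3 ^ (half - j - 1) * 3) =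
        v / 3 ^ j + ((-q) * 3 ^ (half - j - 1)) * 3 from by ring]
  omega

-- The divide-and-conquer decoder also yields the digit-formula list.
theorem decodeDC_eq (p : Nat) (hp : 1 ≤ p) (v : Int) :
    decodeDC v p =
      (List.range p).map (fun pos => Int.fmod (Int.fdiv v (3 ^ (p - 1 - pos))) 3) := by
  induction p using Nat.strong_induction_on generalizing v with
  | _ p ih =>
  by_cases h1 : p = 1
  · subst h1
    simp [decodeDC, List.range_succ]
  · have h2 : 2 ≤ p := by omega
    have hhalf1 : 1 ≤ p / 2 := by omega
    have hrest1 : 1 ≤ p - p / 2 := by omega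
    rw [decodeDC, if_neg h1, if_neg (by omega),
        ih (p - p / 2) (by omega) hrest1, ih (p / 2) (by omega) hhalf1]
    have hrange : List.range p =
        List.range (p - p / 2) ++ (List.range (p / 2)).map (fun x => (p - p / 2) + x) := by
      conv_lhs => rw [show p = (p - p / 2) + p / 2 from by omega]
      exact List.range_add
    rw [hrange, List.map_append, List.map_map]
    congr 1
    · apply List.map_congr_left
      intro pos hpos
      have hlt : pos < p - p / 2 := List.mem_range.mp hpos
      rw [fdiv_fdiv_pos v (3 ^ (p / 2)) _ (by positivity) (by positivity), ← pow_add]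
      congr 3
      omega
    · apply List.map_congr_left
      intro pos hpos
      have hlt : pos < p / 2 := List.mem_range.mp hpos
      simp only [Function.comp]
      rw [fmod_fdiv_fmod v (p / 2) (p / 2 - 1 - pos) (by omega)]
      congr 3
      omega

-- ===== VERDICT (by name: the statement is the Claim_ definition above) =====
theorem decode_tensor_index_py_spec : Claim_equal_decode_tensor_index_py := by
  intro index power _ hpre
  unfold Spec_decode_tensor_index_py decode_tensor_index_py decode_tensor_index_py_alt
  have h : ¬ power < 1 := not_lt.mpr hpre
  have hp1 : 1 ≤ power.toNat := by omega
  rw [if_neg h, if_neg h, decodeLoopA_eq, List.append_nil, decodeDC_eq _ hp1]
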